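-- pv_equiv track=rewrite | github.com/skorch-dev/skorch | skorch/utils.py | duplicate_items
-- ===== SOURCE A (Python) =====
-- from collections.abc import Mapping, Sequence
--
-- def flatten(arr):
--     for item in arr:
--         if isinstance(item, (tuple, list, Mapping)):
--             yield from flatten(item)
--         else:
--             yield item
--
-- def duplicate_items(*collections):
--     """Search for duplicate items in all collections.
--
--     Examples
--     --------
--     >>> duplicate_items([1, 2], [3])
--     set()
--     >>> duplicate_items({1: 'a', 2: 'a'})
--     set()
--     >>> duplicate_items(['a', 'b', 'a'])
--     {'a'}
--     >>> duplicate_items([1, 2], {3: 'hi', 4: 'ha'}, (2, 3))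
--     {2, 3}
--
--     """
--     duplicates = set()
--     seen = set()
--     for item in flatten(collections):
--         if item in seen:
--             duplicates.add(item)
--         else:
--             seen.add(item)
--     return duplicates
-- ===== SOURCE B (Python) =====
-- from collections.abc import Mapping
--
--
-- def _flatten(arr):
--     out = []
--     for item in arr:
--         if isinstance(item, (tuple, list, Mapping)):
--             out.extend(_flatten(item))
--         else:
--             out.append(item)
--     return out
--
--
-- def duplicate_items(*collections):
--     """Two-pass: build a first-occurrence-index table over the flattened
--     items, then keep exactly the items sitting at a non-first position."""
--     flat = _flatten(collections)
--     first_index = {}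
--     for i, x in enumerate(flat):
--         if x not in first_index:
--             first_index[x] = i
--     return {x for i, x in enumerate(flat) if first_index.get(x, i) != i}
-- ===== Notes on version B (the rewrite author's own statement) =====
-- stated objective: alternative
-- what changed: A finds duplicates in one incremental pass maintaining seen/duplicates sets; B makes two separate passes over the flattened items: it first builds a first-occurrence-index table, then filters out the items sitting at a non-first position.
import Mathlib
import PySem

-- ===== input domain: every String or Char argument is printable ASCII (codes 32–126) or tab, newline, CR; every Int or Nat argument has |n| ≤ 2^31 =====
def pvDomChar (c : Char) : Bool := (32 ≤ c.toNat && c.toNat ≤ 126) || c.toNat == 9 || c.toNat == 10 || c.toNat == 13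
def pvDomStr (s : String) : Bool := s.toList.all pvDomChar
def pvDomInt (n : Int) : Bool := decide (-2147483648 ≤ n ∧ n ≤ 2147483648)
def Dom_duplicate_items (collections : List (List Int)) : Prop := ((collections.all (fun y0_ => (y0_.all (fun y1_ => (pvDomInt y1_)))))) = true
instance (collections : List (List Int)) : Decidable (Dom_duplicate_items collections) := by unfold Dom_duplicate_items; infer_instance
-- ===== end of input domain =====

-- B replaces A's incremental seen/duplicates single pass by two passes: build a
-- first-occurrence-index table over the flattened items, then keep the items at
-- non-first positions (objective: alternative decomposition, same cost).
-- The Python return value is a set; both ports represent it as the PySem.Set list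
-- in first-insertion order, which coincides for A and B (proved below).

-- ===== PORT A =====
-- flatten: at the ported type List (List Int) the recursive generator reaches depth
-- exactly two — the outer loop recurses into each list, the inner loop yields ints.
def pyFlatten (arr : List (List Int)) : List Int :=
  arr.foldl (fun out item => out ++ item.foldl (fun o x => o ++ [x]) []) []

def duplicate_items (collections : List (List Int)) : List Int :=
  ((pyFlatten collections).foldl
    (fun (st : PySem.Set Int × PySem.Set Int) item =>
      if PySem.Set.contains st.2 item then (PySem.Set.add st.1 item, st.2)
      else (st.1, PySem.Set.add st.2 item))
    (PySem.Set.empty, PySem.Set.empty)).1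

-- ===== PORT B =====
def duplicate_items_alt (collections : List (List Int)) : List Int :=
  let flat := pyFlatten collections
  let firstIndex :=
    (PySem.List.enumerate flat).foldl
      (fun (d : PySem.Dict Int Int) p =>
        if d.contains p.2 then d else d.insert p.2 p.1)
      PySem.Dict.empty
  PySem.Set.ofList
    (((PySem.List.enumerate flat).filter
        (fun p => firstIndex.getD p.2 p.1 != p.1)).map (·.2))

-- ===== PRECONDITION & SPEC =====
def Spec_duplicate_items (collections : List (List Int)) (out : List Int) : Prop := out = duplicate_items_alt collections
instance (collections : List (List Int)) (out : List Int) : Decidable (Spec_duplicate_items collections out) := by unfold Spec_duplicate_items; infer_instance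

-- ===== CLAIM (what is proved, stated in full; the proofs are below) =====
def Claim_equal_duplicate_items : Prop := ∀ (collections : List (List Int)), Dom_duplicate_items collections → Spec_duplicate_items collections (duplicate_items collections)

-- ===== LEMMAS AND PROOFS =====

-- common specification of both results: the items of l sitting at a repeat
-- occurrence (their value already in `seen`), in encounter order, duplicated
def dupAux (seen : PySem.Set Int) : List Int → List Int
  | [] => []
  | x :: xs =>
    if PySem.Set.contains seen x then x :: dupAux seen xs
    else dupAux (PySem.Set.add seen x) xs

theorem foldlA_eq_dupAux (l : List Int) (dups seen : PySem.Set Int) :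
    ((l.foldl
      (fun (st : PySem.Set Int × PySem.Set Int) item =>
        if PySem.Set.contains st.2 item then (PySem.Set.add st.1 item, st.2)
        else (st.1, PySem.Set.add st.2 item))
      (dups, seen)).1)
      = (dupAux seen l).foldl PySem.Set.add dups := by
  induction l generalizing dups seen with
  | nil => simp [dupAux]
  | cons x xs ih =>
    rw [List.foldl_cons]
    simp only [dupAux]
    by_cases h : PySem.Set.contains seen x = true
    · rw [if_pos h, if_pos h, List.foldl_cons]
      exact ih _ _
    · rw [if_neg h, if_neg h]
      exact ih _ _

def buildFirst (d : PySem.Dict Int Int) (ps : List (Int × Int)) : PySem.Dict Int Int :=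
  ps.foldl
    (fun (d : PySem.Dict Int Int) p =>
      if d.contains p.2 then d else d.insert p.2 p.1)
    d

theorem getD_buildFirst (l : List Int) (s : Int) (d : PySem.Dict Int Int) (x dflt : Int) :
    (buildFirst d (PySem.List.enumerate l s)).getD x dflt =
      if d.contains x then d.getD x dflt
      else if x ∈ l then s + (l.idxOf x : Int) else dflt := by
  induction l generalizing s d with
  | nil =>
    by_cases hx : d.contains x = true
    · simp [buildFirst, PySem.List.enumerate_nil, hx]
    · simp [buildFirst, PySem.List.enumerate_nil, hx, PySem.Dict.getD_of_not_contains]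
  | cons a l ih =>
    rw [PySem.List.enumerate_cons]
    show (buildFirst (if d.contains a then d else d.insert a s)
            (PySem.List.enumerate l (s + 1))).getD x dflt = _
    by_cases hc : d.contains a = true
    · rw [if_pos hc, ih]
      by_cases hx : d.contains x = true
      · simp [hx]
      · have hxa : x ≠ a := fun h => absurd hc (by simp [← h, hx])
        by_cases hm : x ∈ l
        · simp [hx, List.idxOf_cons, hxa, Ne.symm hxa, hm]
          ring
        · simp [hx, List.idxOf_cons, hxa, Ne.symm hxa, hm]
    · rw [if_neg hc, ih]
      have hcx : d.contains a = false := by simpa using hc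
      by_cases hxa : x = a
      · subst hxa
        simp [PySem.Dict.contains_insert, PySem.Dict.getD_insert, hcx, List.idxOf_cons]
      · by_cases hx : d.contains x = true
        · simp [PySem.Dict.contains_insert, hxa, hx, PySem.Dict.getD_insert]
        · by_cases hm : x ∈ l
          · simp [PySem.Dict.contains_insert, hxa, hx, PySem.Dict.getD_insert,
              List.idxOf_cons, Ne.symm hxa, hm]
            ring
          · simp [PySem.Dict.contains_insert, hxa, hx, PySem.Dict.getD_insert,
              List.idxOf_cons, Ne.symm hxa, hm]

theorem idxOf_append_self (pre xs : List Int) (x : Int) :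
    (pre ++ x :: xs).idxOf x = if x ∈ pre then pre.idxOf x else pre.length := by
  induction pre with
  | nil => simp [List.idxOf_cons]
  | cons a pre ih =>
    by_cases hxa : x = a
    · subst hxa; simp [List.idxOf_cons]
    · simp [List.idxOf_cons, hxa, Ne.symm hxa, ih]
      by_cases hm : x ∈ pre <;> simp [hm]

theorem filterMap_eq_dupAux (l pre : List Int) :
    (((PySem.List.enumerate l (pre.length : Int)).filter
        (fun p =>
          (buildFirst PySem.Dict.empty
              (PySem.List.enumerate (pre ++ l) 0)).getD p.2 p.1 != p.1)).map (·.2))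
      = dupAux (PySem.Set.ofList pre) l := by
  induction l generalizing pre with
  | nil => simp [dupAux, PySem.List.enumerate_nil]
  | cons x xs ih =>
    rw [PySem.List.enumerate_cons]
    have hval :
        (buildFirst PySem.Dict.empty
            (PySem.List.enumerate (pre ++ x :: xs) 0)).getD x (pre.length : Int)
          = ((pre ++ x :: xs).idxOf x : Int) := by
      rw [getD_buildFirst]
      simp
    have hrec := ih (pre ++ [x])
    rw [List.append_assoc] at hrec
    simp only [List.singleton_append, List.length_append, List.length_cons,
      List.length_nil, Nat.zero_add, Nat.cast_add, Nat.cast_one] at hrec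
    by_cases hm : x ∈ pre
    · have hcond :
          ((buildFirst PySem.Dict.empty
              (PySem.List.enumerate (pre ++ x :: xs) 0)).getD x (pre.length : Int)
            != (pre.length : Int)) = true := by
        rw [hval, idxOf_append_self, if_pos hm]
        have := List.idxOf_lt_length_of_mem hm
        simp only [bne_iff_ne, ne_eq, Int.natCast_inj]
        omega
      rw [PySem.Set.ofList_append_singleton,
        PySem.Set.add_of_mem ((PySem.Set.mem_ofList _ _).2 hm)] at hrec
      simp only [List.filter_cons, hcond, if_true, List.map_cons]
      simp only [dupAux]
      rw [if_pos ((PySem.Set.contains_iff _ _).2 ((PySem.Set.mem_ofList _ _).2 hm))]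
      rw [hrec]
    · have hcond :
          ((buildFirst PySem.Dict.empty
              (PySem.List.enumerate (pre ++ x :: xs) 0)).getD x (pre.length : Int)
            != (pre.length : Int)) = false := by
        rw [hval, idxOf_append_self, if_neg hm]
        simp
      rw [PySem.Set.ofList_append_singleton] at hrec
      simp only [List.filter_cons, hcond, if_false]
      simp only [dupAux]
      have hcf : ¬ (PySem.Set.contains (PySem.Set.ofList pre) x = true) := by
        intro h
        exact hm ((PySem.Set.mem_ofList _ _).1 ((PySem.Set.contains_iff _ _).1 h))
      rw [if_neg hcf]
      exact hrec

-- ===== VERDICT (by name: the statement is the Claim_ definition above) =====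
theorem duplicate_items_spec : Claim_equal_duplicate_items := by
  intro collections _
  unfold Spec_duplicate_items
  simp only [duplicate_items, duplicate_items_alt]
  rw [foldlA_eq_dupAux]
  have h := filterMap_eq_dupAux (pyFlatten collections) []
  simp only [List.length_nil, Nat.cast_zero, List.nil_append] at h
  unfold buildFirst at h
  rw [h, PySem.Set.ofList_eq_foldl]
  rfl
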